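-- pv_equiv track=rewrite | github.com/okaysidd/Interview_material | Extras/Topological_sort_DFS.py | DFS
-- ===== SOURCE A (Python) =====
-- def DFS(graph):
-- 	def dfs_visit(node, result=None):
-- 		if result == None: result = []
-- 		for neighbor in graph[node]:
-- 			if neighbor not in seen:
-- 				result.append(neighbor)
-- 				seen.add(neighbor)
-- 				dfs_visit(neighbor, result)
-- 		return result
-- 	parent = {}
-- 	for node in graph:
-- 		seen = set()
-- 		parent[node] = dfs_visit(node)
-- 	return parent
-- ===== SOURCE B (Python) =====
-- def DFS(graph):
--     parent = {}
--     for node in graph: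
--         seen = set()
--         result = []
--         stack = [iter(graph[node])]
--         while stack:
--             try:
--                 neighbor = next(stack[-1])
--             except StopIteration:
--                 stack.pop()
--                 continue
--             if neighbor not in seen:
--                 result.append(neighbor)
--                 seen.add(neighbor)
--                 stack.append(iter(graph[neighbor]))
--         parent[node] = result
--     return parent
-- ===== Notes on version B (the rewrite author's own statement) =====
-- stated objective: alternative
-- what changed: The recursive dfs_visit with a shared mutable result list is replaced by an explicit stack of iterators (one frame per open adjacency list), iterative instead of recursive; the cost is the same.
import Mathlib
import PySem

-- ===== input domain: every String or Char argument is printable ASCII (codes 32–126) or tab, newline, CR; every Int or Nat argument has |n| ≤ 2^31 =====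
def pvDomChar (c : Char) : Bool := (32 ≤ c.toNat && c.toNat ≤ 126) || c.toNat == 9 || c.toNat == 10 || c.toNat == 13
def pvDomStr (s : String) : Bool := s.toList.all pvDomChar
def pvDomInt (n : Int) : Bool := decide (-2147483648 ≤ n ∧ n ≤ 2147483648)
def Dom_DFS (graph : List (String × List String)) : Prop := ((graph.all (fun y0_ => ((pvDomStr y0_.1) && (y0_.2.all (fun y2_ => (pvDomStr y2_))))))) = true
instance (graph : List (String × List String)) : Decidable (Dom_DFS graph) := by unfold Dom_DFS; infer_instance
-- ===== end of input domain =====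

-- B replaces the recursive dfs_visit (shared mutable result list) by an explicit stack of iterators; same cost, iterative decomposition.
-- ===== PORT A =====
-- graph[x] lookup (first match; [] outside Pre_, where Python A raises KeyError)
def pvLook (graph : List (String × List String)) (k : String) : List String :=
  (PySem.Dict.mk graph).getD k []

-- unfolding lemmas for pvLook, cited by the termination proof of loopB below
theorem pvLook_cons (k1 : String) (v1 : List String) (rest : List (String × List String))
    (k : String) : pvLook ((k1, v1) :: rest) k = if k1 == k then v1 else pvLook rest k := by
  simp only [pvLook, PySem.Dict.getD_eq_get?_getD, PySem.Dict.get?_mk_cons]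
  by_cases h : k1 == k <;> simp [h]

theorem pvLook_not_key (graph : List (String × List String)) (k : String)
    (h : k ∉ graph.map Prod.fst) : pvLook graph k = [] := by
  induction graph with
  | nil => rfl
  | cons kv rest ih =>
    obtain ⟨k1, v1⟩ := kv
    simp only [List.map_cons, List.mem_cons, not_or] at h
    rw [pvLook_cons, if_neg (by simp [beq_iff_eq]; exact fun e => h.1 e.symm)]
    exact ih h.2

-- filter-length lemmas cited by the termination proof of loopB below
theorem pvFilter_le {α : Type} (l : List α) (p q : α → Bool)
    (h : ∀ x ∈ l, p x → q x) : (l.filter p).length ≤ (l.filter q).length := by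
  induction l with
  | nil => simp
  | cons a t ih =>
    have iht := ih (fun x hx => h x (by simp [hx]))
    by_cases hp : p a
    · have hq : q a := h a (by simp) hp
      simp [hp, hq]; omega
    · by_cases hq : q a <;> simp [hp, hq] <;> omega

theorem pvFilter_lt {α : Type} (l : List α) (p q : α → Bool)
    (h : ∀ x ∈ l, p x → q x) (a : α) (ha : a ∈ l) (hqa : q a) (hpa : ¬ p a) :
    (l.filter p).length < (l.filter q).length := by
  induction l with
  | nil => simp at ha
  | cons b t ih =>
    rcases List.mem_cons.mp ha with rfl | hat
    · have hle := pvFilter_le t p q (fun x hx => h x (by simp [hx]))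
      simp [hpa, hqa]; omega
    · have iht := ih (fun x hx => h x (by simp [hx])) hat
      by_cases hp : p b
      · have hq : q b := h b (by simp) hp
        simp [hp, hq]; omega
      · by_cases hq : q b <;> simp [hp, hq] <;> omega

-- lexicographic-triple introduction, cited by the termination proof of loopB below
theorem pvLex3 (a a' b b' c c' : Nat)
    (h : a < a' ∨ (a = a' ∧ b < b') ∨ (a = a' ∧ b = b' ∧ c < c')) :
    Prod.Lex (· < ·) (Prod.Lex (· < ·) (· < ·)) (a, b, c) (a', b', c') := by
  rcases h with h | ⟨rfl, h⟩ | ⟨rfl, rfl, h⟩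
  · exact Prod.Lex.left _ _ h
  · exact Prod.Lex.right _ (Prod.Lex.left _ _ h)
  · exact Prod.Lex.right _ (Prod.Lex.right _ h)

-- the recursive dfs_visit: walks the neighbor list, recursing into each unseen
-- neighbor; fuel is a totality guard only (DFS passes enough for A's recursion depth)
def dfsA (graph : List (String × List String)) :
    Nat → List String → PySem.Set String → List String → PySem.Set String × List String
  | _, [], seen, res => (seen, res)
  | 0, _ :: _, seen, res => (seen, res)
  | fuel + 1, h :: t, seen, res =>
    if PySem.Set.contains seen h then dfsA graph (fuel + 1) t seen res
    else
      let p := dfsA graph fuel (pvLook graph h) (PySem.Set.add seen h) (res ++ [h])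
      dfsA graph (fuel + 1) t p.1 p.2
  termination_by fuel ns _ _ => (fuel, ns.length)

def DFS (graph : List (String × List String)) : List (String × List String) :=
  (graph.foldl
    (fun parent kv =>
      PySem.Dict.insert parent kv.1
        (dfsA graph ((graph.flatMap Prod.snd).length + 1) (pvLook graph kv.1)
          PySem.Set.empty []).2)
    PySem.Dict.empty).items

-- ===== PORT B =====
-- the universe used by the termination measure of the stack loop
def pvAllU (graph : List (String × List String)) : List String :=
  graph.map Prod.fst ++ graph.flatMap Prod.snd

-- the iterator-stack loop: each frame is the not-yet-consumed rest of an adjacency list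
def loopB (graph : List (String × List String)) :
    List (List String) → PySem.Set String → List String → List String
  | [], _, res => res
  | [] :: rest, seen, res => loopB graph rest seen res
  | (h :: t) :: rest, seen, res =>
    if PySem.Set.contains seen h then loopB graph (t :: rest) seen res
    else loopB graph (pvLook graph h :: t :: rest) (PySem.Set.add seen h) (res ++ [h])
  termination_by stack seen _ =>
    (((pvAllU graph).filter (fun x => ¬ PySem.Set.contains seen x)).length,
     (stack.map List.length).sum, stack.length)
  decreasing_by
  · exact pvLex3 _ _ _ _ _ _ (by simp [List.map_cons, List.sum_cons]; try omega)
  · exact pvLex3 _ _ _ _ _ _ (by simp [List.map_cons, List.sum_cons]; try omega)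
  · rename_i hcon
    refine pvLex3 _ _ _ _ _ _ ?_
    by_cases hU : h ∈ pvAllU graph
    · left
      refine pvFilter_lt (pvAllU graph) _ _ ?_ h hU ?_ ?_
      · intro x _ hx
        simp only [decide_eq_true_eq] at hx ⊢
        intro hm
        rw [PySem.Set.contains_iff] at hm
        exact hx (by rw [PySem.Set.contains_iff, PySem.Set.mem_add]; exact Or.inl hm)
      · simpa using hcon
      · simp [PySem.Set.mem_add]
    · refine Or.inr (Or.inl ⟨?_, ?_⟩)
      · congr 1
        apply List.filter_congr
        intro x hx
        have hxh : x ≠ h := fun e => hU (e ▸ hx)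
        simp [PySem.Set.mem_add, hxh]
      · rw [pvLook_not_key graph h (fun hkm => hU (by simp only [pvAllU, List.mem_append]; exact Or.inl hkm))]
        simp

def DFS_alt (graph : List (String × List String)) : List (String × List String) :=
  (graph.foldl
    (fun parent kv =>
      PySem.Dict.insert parent kv.1
        (loopB graph [pvLook graph kv.1] PySem.Set.empty []))
    PySem.Dict.empty).items

-- ===== PRECONDITION & SPEC =====
-- Pre_ excludes (a) graphs with a neighbor that is not a key, on which Python A raises KeyError,
-- and (b) association lists with duplicate keys, which a Python dict cannot represent
-- (the dict collapses them last-wins, an accident of the encoding, while the assoc-list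
-- convention reads the first match).
def Pre_DFS (graph : List (String × List String)) : Prop :=
  (graph.map Prod.fst).Nodup ∧
  ∀ kv ∈ graph, ∀ v ∈ kv.2, v ∈ graph.map Prod.fst
instance (graph : List (String × List String)) : Decidable (Pre_DFS graph) := by
  unfold Pre_DFS; infer_instance

def pvWitness_DFS : (List (String × List String)) :=
  [("a", ["b", "a"]), ("b", ["a"]), ("c", [])]

def Spec_DFS (graph : List (String × List String)) (out : List (String × List String)) : Prop := out = DFS_alt graph
instance (graph : List (String × List String)) (out : List (String × List String)) : Decidable (Spec_DFS graph out) := by unfold Spec_DFS; infer_instance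

-- ===== CLAIM (what is proved, stated in full; the proofs are below) =====
def Claim_equal_DFS : Prop := ∀ (graph : List (String × List String)), Dom_DFS graph → Pre_DFS graph → Spec_DFS graph (DFS graph)

-- ===== LEMMAS AND PROOFS =====

-- number of appendable nodes not yet seen (the fuel bound for dfsA)
def pvUnseen (graph : List (String × List String)) (seen : PySem.Set String) : Nat :=
  ((graph.flatMap Prod.snd).filter (fun x => ¬ PySem.Set.contains seen x)).length

theorem pvLook_subset (graph : List (String × List String)) (k : String) :
    ∀ x ∈ pvLook graph k, x ∈ graph.flatMap Prod.snd := by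
  induction graph with
  | nil => simp [show pvLook [] k = [] from rfl]
  | cons kv rest ih =>
    obtain ⟨k1, v1⟩ := kv
    intro x hx
    rw [pvLook_cons] at hx
    simp only [List.flatMap_cons, List.mem_append]
    by_cases h : k1 == k
    · simp [h] at hx; exact Or.inl hx
    · simp [h] at hx; exact Or.inr (ih x hx)

theorem dfsA_seen_mono (graph : List (String × List String)) :
    ∀ fuel ns seen res x, x ∈ seen → x ∈ (dfsA graph fuel ns seen res).1 := by
  intro fuel
  induction fuel using Nat.strong_induction_on with
  | _ fuel ihf =>
    intro ns
    induction ns with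
    | nil => intro seen res x hx; simpa [dfsA] using hx
    | cons h t iht =>
      intro seen res x hx
      rcases fuel with _ | f
      · simpa [dfsA] using hx
      · rw [dfsA]
        by_cases hc : PySem.Set.contains seen h
        · simp only [hc, if_true]
          exact iht seen res x hx
        · simp only [hc]
          simp only [Bool.false_eq_true, if_false]
          apply iht
          apply ihf f (by omega)
          rw [PySem.Set.mem_add]
          exact Or.inl hx

theorem pvUnseen_mono (graph : List (String × List String))
    (s s' : PySem.Set String) (hsub : ∀ x ∈ s, x ∈ s') :
    pvUnseen graph s' ≤ pvUnseen graph s := by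
  unfold pvUnseen
  apply pvFilter_le
  intro x _ hx
  simp only [decide_eq_true_eq] at hx ⊢
  intro hm
  rw [PySem.Set.contains_iff] at hm
  exact hx (by rw [PySem.Set.contains_iff]; exact hsub x hm)

theorem loopB_eq_dfsA (graph : List (String × List String)) :
    ∀ fuel ns seen res stack,
      (∀ x ∈ ns, x ∈ graph.flatMap Prod.snd) →
      pvUnseen graph seen < fuel →
      loopB graph (ns :: stack) seen res =
        loopB graph stack (dfsA graph fuel ns seen res).1 (dfsA graph fuel ns seen res).2 := by
  intro fuel
  induction fuel using Nat.strong_induction_on with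
  | _ fuel ihf =>
    intro ns
    induction ns with
    | nil =>
      intro seen res stack _ _
      rw [loopB, dfsA]
    | cons h t iht =>
      intro seen res stack hns hfuel
      rcases fuel with _ | f
      · omega
      · rw [loopB, dfsA]
        by_cases hc : PySem.Set.contains seen h
        · simp only [hc, if_true]
          exact iht seen res stack (fun x hx => hns x (by simp [hx])) hfuel
        · simp only [hc]
          simp only [Bool.false_eq_true, if_false]
          have hhW : h ∈ graph.flatMap Prod.snd := hns h (by simp)
          have hdec : pvUnseen graph (PySem.Set.add seen h) < pvUnseen graph seen := by
            unfold pvUnseen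
            refine pvFilter_lt _ _ _ ?_ h hhW ?_ ?_
            · intro x _ hx
              simp only [decide_eq_true_eq] at hx ⊢
              intro hm
              rw [PySem.Set.contains_iff] at hm
              exact hx (by rw [PySem.Set.contains_iff, PySem.Set.mem_add]; exact Or.inl hm)
            · simpa using hc
            · simp [PySem.Set.mem_add]
          have hlt : pvUnseen graph (PySem.Set.add seen h) < f := by omega
          rw [ihf f (by omega) (pvLook graph h) (PySem.Set.add seen h) (res ++ [h])
              (t :: stack) (pvLook_subset graph h) hlt]
          set p := dfsA graph f (pvLook graph h) (PySem.Set.add seen h) (res ++ [h]) with hp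
          have hmono : pvUnseen graph p.1 ≤ pvUnseen graph (PySem.Set.add seen h) :=
            pvUnseen_mono graph _ _ (fun x hx => dfsA_seen_mono graph f _ _ _ x hx)
          exact iht p.1 p.2 stack (fun x hx => hns x (by simp [hx])) (by omega)

theorem perNode (graph : List (String × List String)) (k : String) :
    loopB graph [pvLook graph k] PySem.Set.empty [] =
      (dfsA graph ((graph.flatMap Prod.snd).length + 1) (pvLook graph k)
        PySem.Set.empty []).2 := by
  rw [loopB_eq_dfsA graph ((graph.flatMap Prod.snd).length + 1) (pvLook graph k)
      PySem.Set.empty [] [] (pvLook_subset graph k)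
      (by unfold pvUnseen; exact Nat.lt_succ_of_le (List.length_filter_le _ _))]
  rw [loopB]

theorem foldl_congr_fn {α β : Type} (l : List α) (f g : β → α → β) (init : β)
    (h : ∀ acc x, x ∈ l → f acc x = g acc x) : l.foldl f init = l.foldl g init := by
  induction l generalizing init with
  | nil => rfl
  | cons a t ih =>
    simp only [List.foldl_cons]
    rw [h init a (by simp)]
    exact ih _ (fun acc x hx => h acc x (by simp [hx]))

-- ===== VERDICT (by name: the statement is the Claim_ definition above) =====
theorem DFS_spec : Claim_equal_DFS := by
  intro graph _ _
  unfold Spec_DFS DFS DFS_alt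
  congr 1
  apply foldl_congr_fn
  intro acc kv _
  rw [perNode]
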